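-- pv_equiv track=rewrite | github.com/lk-li/spider_reverse | douyin/websdk.py | encryptUint32Array
-- ===== SOURCE A (Python) =====
-- def int32(i):
--     return int(0xFFFFFFFF & i)
--
-- def mx(sum, y, z, p, e, k):
--     tmp = (((z >> 5) ^ (y << 2)) + ((y >> 3) ^ (z << 4)))
--     tmp ^= ((sum ^ y) + (k[p & 3 ^ e] ^ z))
--     return tmp
--
-- def encryptUint32Array(v, k):
--     DELTA = 2654435769
--     length = len(v)
--     n = length - 1
--     y, z, sum, e, p, q = 0, 0, 0, 0, 0, 0
--     z = v[n]
--     sum = 0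
--     for q in range((6 + 52 // length) | 0, 0, -1):
--         sum = int32(sum + DELTA)
--         e = sum >> 2 & 3
--         for p in range(n):
--             y = v[p + 1]
--             z = v[p] = int32(v[p] + mx(sum, y, z, p, e, k))
--         y = v[0]
--         z = v[n] = int32(v[n] + mx(sum, y, z, n, e, k))
--     return v
-- ===== SOURCE B (Python) =====
-- def encryptUint32Array(v, k):
--     DELTA = 2654435769
--     MASK = 0xFFFFFFFF
--
--     def mix(s, e, j, y, z):
--         return ((((z >> 5) ^ (y << 2)) + ((y >> 3) ^ (z << 4)))
--                 ^ ((s ^ y) + (k[j & 3 ^ e] ^ z)))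
--
--     def one_round(vals, z, s):
--         # build a fresh list left to right; every y except the last is a
--         # lookahead into the untouched snapshot, the last wraps to out[0]
--         e = s >> 2 & 3
--         out = []
--         for j, (x, y) in enumerate(zip(vals, vals[1:])):
--             z = (x + mix(s, e, j, y, z)) & MASK
--             out.append(z)
--         x = vals[-1]
--         y = out[0] if out else x
--         z = (x + mix(s, e, len(vals) - 1, y, z)) & MASK
--         out.append(z)
--         return out, z
--
--     def crypt(vals, z, s, r):
--         if r == 0:
--             return vals
--         s = (s + DELTA) & MASK
--         vals, z = one_round(vals, z, s)
--         return crypt(vals, z, s, r - 1)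
--
--     v[:] = crypt(list(v), v[-1], 0, 6 + 52 // len(v))
--     return v
-- ===== Notes on version B (the rewrite author's own statement) =====
-- stated objective: alternative
-- what changed: B is purely functional: rounds are a recursion carrying (vals, z, s) instead of A's for-loop over a mutated array, and each round is a single pass over zip(vals, vals[1:]) of the untouched snapshot that appends to a fresh output list (the wrap-around y comes from out[0]), whereas A mutates v[p] in place by index with a peeled last iteration; correctness rests on the fact that A's read v[p+1] is always a not-yet-updated value.
import Mathlib
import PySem

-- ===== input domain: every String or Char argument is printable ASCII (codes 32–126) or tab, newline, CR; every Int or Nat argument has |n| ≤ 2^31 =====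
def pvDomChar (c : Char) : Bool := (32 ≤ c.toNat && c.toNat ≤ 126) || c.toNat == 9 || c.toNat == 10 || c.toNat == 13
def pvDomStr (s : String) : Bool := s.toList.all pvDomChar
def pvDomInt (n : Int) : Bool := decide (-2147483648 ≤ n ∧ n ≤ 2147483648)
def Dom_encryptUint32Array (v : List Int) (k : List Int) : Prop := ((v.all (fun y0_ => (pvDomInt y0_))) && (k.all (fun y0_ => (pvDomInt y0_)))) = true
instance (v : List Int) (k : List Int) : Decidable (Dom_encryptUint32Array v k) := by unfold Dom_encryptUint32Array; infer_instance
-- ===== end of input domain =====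

-- B is a purely functional re-decomposition: rounds are a recursion carrying (vals, z, s)
-- instead of A's loop over a mutated array, and each round is one pass over
-- zip(vals, vals[1:]) of the untouched snapshot appending to a fresh output list, the
-- wrap-around y coming from out[0] (objective: alternative). A mutates v in place; B writes
-- the result back via v[:] = …, so both versions also leave v mutated to the returned list.

-- ===== PORT A =====
def pvInt32 (i : Int) : Int := PySem.Int.band 0xFFFFFFFF i

def pvMx (sum y z p e : Int) (k : List Int) : Int :=
  let tmp := PySem.Int.bxor (z >>> 5) (y <<< 2) + PySem.Int.bxor (y >>> 3) (z <<< 4)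
  PySem.Int.bxor tmp (PySem.Int.bxor sum y + PySem.Int.bxor (PySem.List.pyGetD k (PySem.Int.bxor (PySem.Int.band p 3) e) 0) z)

-- inner loop body of A: state (v, z), loop variable p ∈ range(n)
def pvInnerA (sum e : Int) (k : List Int) (vz : List Int × Int) (p : Nat) : List Int × Int :=
  let y := vz.1.getD (p + 1) 0
  let z := pvInt32 (vz.1.getD p 0 + pvMx sum y vz.2 (p : Int) e k)
  (vz.1.set p z, z)

-- one round of A: inner loop over range(n), then the peeled final-element update
def pvRoundA (n : Nat) (k : List Int) (st : List Int × Int × Int) : List Int × Int × Int :=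
  let sum := pvInt32 (st.2.2 + 2654435769)
  let e := PySem.Int.band (sum >>> 2) 3
  let vz := (List.range n).foldl (pvInnerA sum e k) (st.1, st.2.1)
  let y := vz.1.getD 0 0
  let z := pvInt32 (vz.1.getD n 0 + pvMx sum y vz.2 (n : Int) e k)
  (vz.1.set n z, z, sum)

def encryptUint32Array (v : List Int) (k : List Int) : List Int :=
  if v.length = 0 then v  -- Python raises IndexError at z = v[n] here; outside Pre_
  else
    let n := v.length - 1
    let z := v.getD n 0
    let rounds := PySem.List.pyRange (6 + PySem.Int.floordiv 52 (v.length : Int)) 0 (-1)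
    (rounds.foldl (fun st _ => pvRoundA n k st) (v, z, 0)).1

-- ===== PORT B =====
-- B's mix helper, k index inlined as in Source B
def pvMixB (k : List Int) (s e j y z : Int) : Int :=
  PySem.Int.bxor
    (PySem.Int.bxor (z >>> 5) (y <<< 2) + PySem.Int.bxor (y >>> 3) (z <<< 4))
    (PySem.Int.bxor s y + PySem.Int.bxor (PySem.List.pyGetD k (PySem.Int.bxor (PySem.Int.band j 3) e) 0) z)

-- loop body of B's single pass: state (out, z), element (j, (x, y)) from enumerate(zip(...))
def pvBodyB (k : List Int) (s e : Int) (acc : List Int × Int) (jxy : Int × Int × Int) : List Int × Int :=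
  let z := PySem.Int.band (jxy.2.1 + pvMixB k s e jxy.1 jxy.2.2 acc.2) 0xFFFFFFFF
  (acc.1 ++ [z], z)

-- one_round of Source B: one pass over enumerate(zip(vals, vals[1:])), then the wrap-around element
def pvOneRoundB (k : List Int) (vals : List Int) (z s : Int) : List Int × Int :=
  let e := PySem.Int.band (s >>> 2) 3
  let oz := (PySem.List.enumerate (vals.zip (vals.drop 1))).foldl (pvBodyB k s e) ([], z)
  let x := vals.getD (vals.length - 1) 0  -- vals[-1]; exact, vals is nonempty wherever called
  let y := match oz.1 with | [] => x | h :: _ => h  -- out[0] if out else x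
  let z2 := PySem.Int.band (x + pvMixB k s e ((vals.length - 1 : Nat) : Int) y oz.2) 0xFFFFFFFF
  (oz.1 ++ [z2], z2)

-- crypt of Source B: recursion over the round count
def pvCryptB (k : List Int) (vals : List Int) (z s : Int) : Nat → List Int
  | 0 => vals
  | r + 1 =>
    let s2 := PySem.Int.band (s + 2654435769) 0xFFFFFFFF
    let oz := pvOneRoundB k vals z s2
    pvCryptB k oz.1 oz.2 s2 r

def encryptUint32Array_alt (v : List Int) (k : List Int) : List Int :=
  if v.length = 0 then v  -- Python raises IndexError at v[-1] here; outside Pre_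
  else
    -- round count 6 + 52 // len(v) is a positive int, taken as the recursion fuel
    pvCryptB k v (v.getD (v.length - 1) 0) 0 (6 + PySem.Int.floordiv 52 (v.length : Int)).toNat

-- ===== PRECONDITION & SPEC =====
-- Pre_ excludes exactly the inputs where the Python A raises: v = [] (IndexError at v[n]) and
-- len(k) < 4 (IndexError at k[p & 3 ^ e], whose index reaches 3 during the rounds).
def Pre_encryptUint32Array (v : List Int) (k : List Int) : Prop := v ≠ [] ∧ 4 ≤ k.length
instance (v : List Int) (k : List Int) : Decidable (Pre_encryptUint32Array v k) := by unfold Pre_encryptUint32Array; infer_instance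

def pvWitness_encryptUint32Array : List Int × List Int := ([1, 2, 3], [4, 5, 6, 7])

def Spec_encryptUint32Array (v : List Int) (k : List Int) (out : List Int) : Prop := out = encryptUint32Array_alt v k
instance (v : List Int) (k : List Int) (out : List Int) : Decidable (Spec_encryptUint32Array v k out) := by unfold Spec_encryptUint32Array; infer_instance

-- ===== CLAIM (what is proved, stated in full; the proofs are below) =====
def Claim_equal_encryptUint32Array : Prop := ∀ (v : List Int) (k : List Int), Dom_encryptUint32Array v k → Pre_encryptUint32Array v k → Spec_encryptUint32Array v k (encryptUint32Array v k)

-- ===== LEMMAS AND PROOFS =====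

-- x & 0xFFFFFFFF (B's inline masking) is A's int32 helper
theorem pv_band_mask (x : Int) : PySem.Int.band x 0xFFFFFFFF = pvInt32 x := by
  unfold pvInt32; exact PySem.Int.band_comm x 0xFFFFFFFF

-- B's mix is A's mx with the arguments reordered
theorem pv_mix_eq (k : List Int) (s e j y z : Int) : pvMixB k s e j y z = pvMx s y z j e k := rfl

-- B's proof-side round function on A's state shape (vals, z, s)
def pvRoundT (k : List Int) (st : List Int × Int × Int) : List Int × Int × Int :=
  let s2 := PySem.Int.band (st.2.2 + 2654435769) 0xFFFFFFFF
  let oz := pvOneRoundB k st.1 st.2.1 s2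
  (oz.1, oz.2, s2)

-- the first j steps of B's single pass (proof-side name for the partial fold)
def pvPass (k : List Int) (s e : Int) (v0 : List Int) (z0 : Int) (j : Nat) : List Int × Int :=
  ((PySem.List.enumerate (v0.zip (v0.drop 1))).take j).foldl (pvBodyB k s e) ([], z0)

-- invariant of the inner pass: after j steps, A's mutated array is B's partial output
-- followed by the untouched tail of the snapshot, and the carried z's agree
theorem pv_inner_inv (k : List Int) (s e : Int) (v0 : List Int) (z0 : Int) (j : Nat)
    (hj : j ≤ v0.length - 1) (hv : v0 ≠ []) :
    (pvPass k s e v0 z0 j).1.length = j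
    ∧ (List.range j).foldl (pvInnerA s e k) (v0, z0)
      = ((pvPass k s e v0 z0 j).1 ++ v0.drop j, (pvPass k s e v0 z0 j).2) := by
  induction j with
  | zero => simp [pvPass]
  | succ j ih =>
    have hL : 0 < v0.length := List.length_pos_of_ne_nil hv
    have hj1 : j + 1 < v0.length := by omega
    have hjv : j < v0.length := by omega
    obtain ⟨hlen, heq⟩ := ih (by omega)
    have hjz : j < ((v0.zip (v0.drop 1))).length := by
      simp [List.length_zip]; omega
    have hje : j < (PySem.List.enumerate (v0.zip (v0.drop 1))).length := by
      simpa [PySem.List.length_enumerate] using hjz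
    have helt : (PySem.List.enumerate (v0.zip (v0.drop 1)))[j]'hje
        = ((j : Int), (v0[j]'hjv, v0[j + 1]'hj1)) := by
      rw [PySem.List.getElem_enumerate]
      simp [List.getElem_zip]
    have hstep : pvPass k s e v0 z0 (j + 1)
        = pvBodyB k s e (pvPass k s e v0 z0 j) ((j : Int), (v0[j]'hjv, v0[j + 1]'hj1)) := by
      unfold pvPass
      rw [List.take_succ_eq_append_getElem hje, helt, List.foldl_append]
      rfl
    have hdropj : v0.drop j = v0[j]'hjv :: v0.drop (j + 1) := List.drop_eq_getElem_cons hjv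
    have hget_j : ((pvPass k s e v0 z0 j).1 ++ v0.drop j).getD j 0 = v0[j]'hjv := by
      rw [List.getD_eq_getElem?_getD, List.getElem?_append_right (by omega), hlen, Nat.sub_self,
        hdropj]
      rfl
    have hget_j1 : ((pvPass k s e v0 z0 j).1 ++ v0.drop j).getD (j + 1) 0 = v0[j + 1]'hj1 := by
      rw [List.getD_eq_getElem?_getD, List.getElem?_append_right (by omega), hlen,
        Nat.add_sub_cancel_left, hdropj]
      simp only [List.getElem?_cons_succ, List.getElem?_drop]
      rw [List.getElem?_eq_getElem hj1]
      rfl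
    have hset : ((pvPass k s e v0 z0 j).1 ++ v0.drop j).set j
          (pvInt32 (v0[j]'hjv + pvMx s (v0[j + 1]'hj1) (pvPass k s e v0 z0 j).2 (j : Int) e k))
        = (pvPass k s e v0 z0 j).1
          ++ [pvInt32 (v0[j]'hjv + pvMx s (v0[j + 1]'hj1) (pvPass k s e v0 z0 j).2 (j : Int) e k)]
          ++ v0.drop (j + 1) := by
      rw [List.set_append_right _ _ (by omega), hlen, Nat.sub_self, hdropj,
        List.set_cons_zero, List.append_assoc, List.singleton_append]
    refine ⟨?_, ?_⟩
    · rw [hstep]; simp [pvBodyB, hlen]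
    · rw [List.range_succ, List.foldl_append, heq, hstep]
      simp only [List.foldl_cons, List.foldl_nil, pvInnerA, pvBodyB]
      rw [hget_j, hget_j1, pv_mix_eq, pv_band_mask, hset]

-- one round of B = one round of A, and it preserves the length
theorem pv_round_eq (k : List Int) (st : List Int × Int × Int) (hv : st.1 ≠ []) :
    pvRoundT k st = pvRoundA (st.1.length - 1) k st
    ∧ (pvRoundT k st).1.length = st.1.length := by
  obtain ⟨v0, z0, s0⟩ := st
  simp only at hv
  have hL : 0 < v0.length := List.length_pos_of_ne_nil hv
  have hnv : v0.length - 1 < v0.length := by omega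
  obtain ⟨hlen, heq⟩ := pv_inner_inv k (pvInt32 (s0 + 2654435769))
      (PySem.Int.band (pvInt32 (s0 + 2654435769) >>> 2) 3) v0 z0 (v0.length - 1) (le_refl _) hv
  have htake : (PySem.List.enumerate (v0.zip (v0.drop 1))).take (v0.length - 1)
      = PySem.List.enumerate (v0.zip (v0.drop 1)) := by
    apply List.take_of_length_le
    simp [PySem.List.length_enumerate, List.length_zip]
  have hpass : pvPass k (pvInt32 (s0 + 2654435769))
        (PySem.Int.band (pvInt32 (s0 + 2654435769) >>> 2) 3) v0 z0 (v0.length - 1)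
      = (PySem.List.enumerate (v0.zip (v0.drop 1))).foldl
          (pvBodyB k (pvInt32 (s0 + 2654435769))
            (PySem.Int.band (pvInt32 (s0 + 2654435769) >>> 2) 3)) ([], z0) := by
    unfold pvPass; rw [htake]
  rw [hpass] at hlen heq
  simp only [pvRoundT, pvRoundA, pvOneRoundB, pv_band_mask]
  set sum := pvInt32 (s0 + 2654435769) with hsum
  set e := PySem.Int.band (sum >>> 2) 3 with he
  set G := (PySem.List.enumerate (v0.zip (v0.drop 1))).foldl (pvBodyB k sum e) ([], z0) with hG
  rw [heq]
  have hdropn : v0.drop (v0.length - 1) = [v0[v0.length - 1]'hnv] := by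
    have h2 : v0.drop (v0.length - 1 + 1) = [] := List.drop_eq_nil_of_le (by omega)
    rw [List.drop_eq_getElem_cons hnv, h2]
  have hxn : v0.getD (v0.length - 1) 0 = v0[v0.length - 1]'hnv := by
    rw [List.getD_eq_getElem?_getD, List.getElem?_eq_getElem hnv]; rfl
  have hget_n : (G.1 ++ v0.drop (v0.length - 1)).getD (v0.length - 1) 0 = v0[v0.length - 1]'hnv := by
    rw [List.getD_eq_getElem?_getD, List.getElem?_append_right (by omega), hlen]
    simp [hdropn]
  have hget_0 : (G.1 ++ v0.drop (v0.length - 1)).getD 0 0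
      = (match G.1 with | [] => v0.getD (v0.length - 1) 0 | h :: _ => h : Int) := by
    cases hG1 : G.1 with
    | nil =>
      simp only [List.nil_append, hdropn, hxn]
      simp
    | cons h t => simp
  have hset : ∀ z : Int, (G.1 ++ v0.drop (v0.length - 1)).set (v0.length - 1) z = G.1 ++ [z] := by
    intro z
    rw [List.set_append_right _ _ (by omega), hlen, hdropn]
    simp
  simp only [Prod.mk.injEq]
  refine ⟨⟨?_, ?_, trivial⟩, ?_⟩
  · rw [hget_n, hget_0, hset, pv_mix_eq, hxn]
  · rw [hget_n, hget_0, pv_mix_eq, hxn]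
  · simp [hlen]
    omega

-- B's round recursion is the iterate of A's round function
theorem pv_crypt_iter (k : List Int) (L : Nat) (hL : 0 < L) :
    ∀ (r : Nat) (vals : List Int) (z s : Int), vals.length = L →
      pvCryptB k vals z s r = ((fun st => pvRoundA (L - 1) k st)^[r] (vals, z, s)).1 := by
  intro r
  induction r with
  | zero => intro vals z s _; rfl
  | succ r ih =>
    intro vals z s hlen
    have hv : vals ≠ [] := by
      intro h; rw [h] at hlen; simp at hlen; omega
    obtain ⟨heq, hpres⟩ := pv_round_eq k (vals, z, s) hv
    have hR : pvRoundT k (vals, z, s) = pvRoundA (L - 1) k (vals, z, s) := by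
      rw [heq]; simp only [hlen]
    have hlen' : (pvRoundT k (vals, z, s)).1.length = L := by rw [hpres]; exact hlen
    rw [Function.iterate_succ_apply, ← hR,
        ← ih (pvRoundT k (vals, z, s)).1 (pvRoundT k (vals, z, s)).2.1
          (pvRoundT k (vals, z, s)).2.2 hlen']
    rfl

-- a foldl whose body ignores the list element is an iterate of its state function
theorem pv_foldl_ignore {α β : Type} (f : α → α) (l : List β) (init : α) :
    l.foldl (fun st _ => f st) init = f^[l.length] init := by
  induction l generalizing init with
  | nil => rfl
  | cons x xs ih => simp [List.foldl_cons, ih, Function.iterate_succ_apply]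

-- ===== VERDICT (by name: the statement is the Claim_ definition above) =====
theorem encryptUint32Array_spec : Claim_equal_encryptUint32Array := by
  intro v k _hdom hpre
  have hv : ¬ v.length = 0 := by simpa [List.length_eq_zero_iff] using hpre.1
  have hL : 0 < v.length := Nat.pos_of_ne_zero hv
  simp only [Spec_encryptUint32Array, encryptUint32Array, encryptUint32Array_alt, hv, if_false]
  rw [pv_foldl_ignore, PySem.List.length_pyRange_neg_one,
      pv_crypt_iter k v.length hL _ v _ 0 rfl]
  simp
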